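-- pv_equiv track=rewrite | github.com/zsoltzombori/mapping | query.py | recover_triples
-- ===== SOURCE A (Python) =====
-- def recover_triples(triplestring):
--     parts = triplestring.split()
--     triples = []
--     subject = None
--     predicate = None
--     position = 0
--     for p in parts:
--         if p == ".":
--             continue
--         if position == 0: # expecting subject
--             subject = p
--             position = 1
--         elif position == 1: # expecting object
--             predicate = p
--             if predicate == "a":
--                 predicate = "rdf:type"
--             position = 2
--         elif position == 2:
--             if p[-1] == ";":
--                 triples.append((subject, predicate, p[:-1]))
--                 position = 1
--             else:
--                 triples.append((subject, predicate, p))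
--                 position = 0
--     return triples
-- ===== SOURCE B (Python) =====
-- def recover_triples(triplestring):
--     # Drop "." tokens up front (they never change state), then read one
--     # subject and consume predicate-object pairs until an object without a
--     # trailing ';' closes the group.
--     tokens = [t for t in triplestring.split() if t != "."]
--     n = len(tokens)
--     triples = []
--     i = 0
--     while i < n:
--         subject = tokens[i]
--         i += 1
--         while i + 1 < n:
--             pred = tokens[i]
--             if pred == "a":
--                 pred = "rdf:type"
--             obj = tokens[i + 1]
--             i += 2
--             if obj.endswith(";"):
--                 triples.append((subject, pred, obj[:-1]))
--             else:
--                 triples.append((subject, pred, obj))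
--                 break
--     return triples
-- ===== Notes on version B (the rewrite author's own statement) =====
-- stated objective: alternative
-- what changed: Replaces A's single-pass position state machine (position 0/1/2 with subject/predicate registers) by a pre-filter of '.' tokens followed by nested loops: an outer loop reading one subject and an inner loop consuming predicate-object pairs until an object without a trailing ';' closes the group.
import Mathlib
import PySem

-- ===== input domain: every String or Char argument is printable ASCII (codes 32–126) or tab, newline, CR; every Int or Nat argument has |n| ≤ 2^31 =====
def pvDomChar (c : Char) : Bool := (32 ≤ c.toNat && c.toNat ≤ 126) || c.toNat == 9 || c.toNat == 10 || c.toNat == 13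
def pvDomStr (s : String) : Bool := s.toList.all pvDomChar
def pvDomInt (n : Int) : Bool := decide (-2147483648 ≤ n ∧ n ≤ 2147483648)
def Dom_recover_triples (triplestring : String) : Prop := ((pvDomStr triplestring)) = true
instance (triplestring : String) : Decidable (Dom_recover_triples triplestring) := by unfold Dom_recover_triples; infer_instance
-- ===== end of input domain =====

-- B replaces A's position state machine by a '.'-pre-filter plus nested subject/pair loops (alternative decomposition, same cost).

-- ===== PORT A =====
-- state = (triples, subject, predicate, position); Python's possibly-unset subject/predicate are Option String
def pvStepA (st : List (String × String × String) × Option String × Option String × Int)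
    (p : String) : List (String × String × String) × Option String × Option String × Int :=
  match st with
  | (triples, subject, predicate, position) =>
    if p = "." then (triples, subject, predicate, position)
    else if position = 0 then (triples, some p, predicate, 1)
    else if position = 1 then
      (triples, subject, some (if p = "a" then "rdf:type" else p), 2)
    else if position = 2 then
      -- p[-1] == ";" : tokens from split() are nonempty, so pyGet? is some here
      if PySem.Str.pyGet? p (-1) = some ';' then
        (triples ++ [(subject.getD "", predicate.getD "", PySem.Str.slice p none (some (-1)))],
         subject, predicate, 1)
      else
        (triples ++ [(subject.getD "", predicate.getD "", p)], subject, predicate, 0)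
    else (triples, subject, predicate, position)

def recover_triples (triplestring : String) : List (String × String × String) :=
  ((PySem.Str.split₀ triplestring).foldl pvStepA ([], none, none, 0)).1

-- ===== PORT B =====
mutual
-- outer while loop: read a subject, hand over to the pair loop
def pvSubjLoop : List String → List (String × String × String)
  | [] => []
  | s :: rest => pvPairLoop s rest
  termination_by ts => ts.length
-- inner while loop: consume predicate/object pairs for subject s
def pvPairLoop (s : String) : List String → List (String × String × String)
  | pred :: obj :: rest =>
    let pr := if pred = "a" then "rdf:type" else pred
    if PySem.Str.endswith obj ";" then
      (s, pr, PySem.Str.slice obj none (some (-1))) :: pvPairLoop s rest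
    else
      (s, pr, obj) :: pvSubjLoop rest
  | _ => []
  termination_by ts => ts.length
end

def recover_triples_alt (triplestring : String) : List (String × String × String) :=
  pvSubjLoop ((PySem.Str.split₀ triplestring).filter (· ≠ "."))

-- ===== PRECONDITION & SPEC =====
def Spec_recover_triples (triplestring : String) (out : List (String × String × String)) : Prop := out = recover_triples_alt triplestring
instance (triplestring : String) (out : List (String × String × String)) : Decidable (Spec_recover_triples triplestring out) := by unfold Spec_recover_triples; infer_instance

-- ===== CLAIM (what is proved, stated in full; the proofs are below) =====
def Claim_equal_recover_triples : Prop := ∀ (triplestring : String), Dom_recover_triples triplestring → Spec_recover_triples triplestring (recover_triples triplestring)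

-- ===== LEMMAS AND PROOFS =====

-- stepA ignores "." tokens, so folding over the filtered list is the same
theorem pv_fold_filter (ts : List String)
    (st : List (String × String × String) × Option String × Option String × Int) :
    ts.foldl pvStepA st = (ts.filter (· ≠ ".")).foldl pvStepA st := by
  induction ts generalizing st with
  | nil => rfl
  | cons t rest ih =>
    by_cases h : t = "."
    · subst h
      have hst : pvStepA st "." = st := by
        obtain ⟨a, b, c, d⟩ := st
        simp [pvStepA]
      simp [hst, ih]
    · simp [h, ih, pvStepA]

-- "obj ends with ';'" agrees with A's obj[-1] == ';' test on every string
theorem pv_ends_iff (p : String) :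
    (PySem.Str.endswith p ";" = true) ↔ PySem.Str.pyGet? p (-1) = some ';' := by
  rw [PySem.Str.endswith_eq, PySem.Chars.endswith_iff]
  simp only [PySem.Str.pyGet?_eq, PySem.Chars.pyGet?_eq_listPyGet?,
    PySem.List.pyGet?_neg_one]
  constructor
  · rintro ⟨t, h⟩
    rw [← h]
    simp
  · intro h
    rw [List.getLast?_eq_some_iff] at h
    obtain ⟨l', h⟩ := h
    exact ⟨l', by rw [h]; rfl⟩

-- main invariant: fold from position 0 is the subject loop, from position 1 the pair loop
theorem pv_main (n : Nat) (ts : List String) (hn : ts.length ≤ n) (hd : "." ∉ ts) :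
    (∀ acc subj pred, ((ts.foldl pvStepA (acc, subj, pred, 0)).1 = acc ++ pvSubjLoop ts)) ∧
    (∀ acc (s : String) pred, ((ts.foldl pvStepA (acc, some s, pred, 1)).1 = acc ++ pvPairLoop s ts)) := by
  induction n generalizing ts with
  | zero =>
    have : ts = [] := List.length_eq_zero_iff.mp (Nat.le_zero.mp hn)
    subst this
    simp [pvSubjLoop, pvPairLoop]
  | succ n ih =>
    cases ts with
    | nil => simp [pvSubjLoop, pvPairLoop]
    | cons t rest =>
      have ht : t ≠ "." := fun h => hd (h ▸ List.mem_cons_self ..)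
      have hd' : "." ∉ rest := fun h => hd (List.mem_cons_of_mem _ h)
      constructor
      · intro acc subj pred
        have hstep : pvStepA (acc, subj, pred, 0) t = (acc, some t, pred, 1) := by
          simp [pvStepA, ht]
        simp only [List.foldl_cons, hstep, pvSubjLoop]
        exact (ih rest (by simpa using Nat.le_of_succ_le_succ (by simpa using hn)) hd').2 acc t pred
      · intro acc s pred
        have hstep : pvStepA (acc, some s, pred, 1) t
            = (acc, some s, some (if t = "a" then "rdf:type" else t), 2) := by
          simp [pvStepA, ht]
        cases rest with
        | nil =>
          simp only [List.foldl_cons, hstep, List.foldl_nil, pvPairLoop]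
          simp
        | cons obj rest2 =>
          have hobj : obj ≠ "." := fun h => hd' (h ▸ List.mem_cons_self ..)
          have hd'' : "." ∉ rest2 := fun h => hd' (List.mem_cons_of_mem _ h)
          have hlen : rest2.length ≤ n := by
            have := hn; simp [List.length_cons] at this; omega
          by_cases he : PySem.Str.endswith obj ";" = true
          · have hg : PySem.List.pyGet? obj.toList (-1) = some ';' := by
              simpa using (pv_ends_iff obj).mp he
            have hstep2 : pvStepA (acc, some s, some (if t = "a" then "rdf:type" else t), 2) obj
                = (acc ++ [(s, if t = "a" then "rdf:type" else t,
                    PySem.Str.slice obj none (some (-1)))],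
                   some s, some (if t = "a" then "rdf:type" else t), 1) := by
              simp [pvStepA, hobj, hg]
            simp only [List.foldl_cons, hstep, hstep2, pvPairLoop, he, if_true]
            rw [(ih rest2 hlen hd'').2]
            simp
          · have hg : ¬ PySem.List.pyGet? obj.toList (-1) = some ';' := by
              intro h; exact he ((pv_ends_iff obj).mpr (by simpa using h))
            have hstep2 : pvStepA (acc, some s, some (if t = "a" then "rdf:type" else t), 2) obj
                = (acc ++ [(s, if t = "a" then "rdf:type" else t, obj)],
                   some s, some (if t = "a" then "rdf:type" else t), 0) := by
              simp [pvStepA, hobj, hg]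
            simp only [List.foldl_cons, hstep, hstep2, pvPairLoop, he]
            rw [(ih rest2 hlen hd'').1]
            simp

-- ===== VERDICT (by name: the statement is the Claim_ definition above) =====
theorem recover_triples_spec : Claim_equal_recover_triples := by
  intro s _
  unfold Spec_recover_triples recover_triples recover_triples_alt
  rw [pv_fold_filter]
  exact (pv_main _ _ le_rfl (by simp)).1 [] none none
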